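-- pv_equiv track=rewrite | github.com/rurangiza/dojo | src/challenges/a.twins.py | coinsToPick
-- ===== SOURCE A (Python) =====
-- def coinsToPick(coins, n):
--     tot = sum(coins)
--     mine = count = 0
--     coins.sort(reverse=True)
--     for coin in coins:
--         mine += coin
--         count += 1
--         if mine > tot // 2: break
--     return count
-- ===== SOURCE B (Python) =====
-- def coinsToPick(coins, n):
--     # Dual view: instead of greedily picking largest coins until their sum
--     # exceeds half, count how many of the SMALLEST coins can be dropped while
--     # the kept majority still holds strictly more than half the total.
--     coins.sort(reverse=True)
--     tot = sum(coins)
--     need = tot - tot // 2          # picked > tot//2  <=>  dropped < need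
--     dropped = 0
--     best = 0                       # largest m such that the m smallest coins sum < need
--     m = 0
--     for coin in reversed(coins[1:]):   # smallest upward; at most len-1 droppable
--         m += 1
--         dropped += coin
--         if dropped < need:
--             best = m
--     return len(coins) - best
-- ===== Notes on version B (the rewrite author's own statement) =====
-- stated objective: alternative
-- what changed: B computes the complement: instead of A's break-loop accumulating the largest coins until their sum exceeds tot//2, B scans the smallest coins upward (reversed tail of the descending sort) tracking the largest droppable count m with suffix sum < tot - tot//2, and returns len(coins) - m; no early exit, opposite direction, dual quantity.
import Mathlib
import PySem

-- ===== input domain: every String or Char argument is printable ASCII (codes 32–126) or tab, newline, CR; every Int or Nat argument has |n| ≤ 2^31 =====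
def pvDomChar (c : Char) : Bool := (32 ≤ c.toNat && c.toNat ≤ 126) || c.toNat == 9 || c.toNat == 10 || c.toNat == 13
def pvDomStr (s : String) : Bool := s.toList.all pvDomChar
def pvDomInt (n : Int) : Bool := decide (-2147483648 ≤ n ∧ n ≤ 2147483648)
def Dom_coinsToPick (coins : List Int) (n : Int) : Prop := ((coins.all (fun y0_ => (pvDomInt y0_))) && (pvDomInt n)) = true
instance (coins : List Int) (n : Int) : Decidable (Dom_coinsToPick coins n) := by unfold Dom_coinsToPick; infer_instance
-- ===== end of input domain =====

-- B counts the complement — how many of the smallest coins can be dropped while the kept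
-- coins still exceed half — instead of A's break-loop over the largest coins (alternative).
-- Both A and B sort the list in place; the equivalence proved is about the return value.

-- ===== PORT A =====
def coinsToPickLoop (tot : Int) : List Int → Int → Int → Int
  | [], _, count => count
  | c :: rest, mine, count =>
    let mine' := mine + c
    let count' := count + 1
    if mine' > PySem.Int.floordiv tot 2 then count' else coinsToPickLoop tot rest mine' count'

def coinsToPick (coins : List Int) (n : Int) : Int :=
  let tot := coins.sum
  let s := PySem.List.sorted coins (fun x => x) true
  coinsToPickLoop tot s 0 0

-- ===== PORT B =====
-- the for-loop over reversed(coins[1:]) with state (m, dropped, best)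
def altLoop (need : Int) : List Int → Int → Int → Int → Int
  | [], _, _, best => best
  | c :: r, m, dropped, best =>
    let m' := m + 1
    let d' := dropped + c
    altLoop need r m' d' (if d' < need then m' else best)

def coinsToPick_alt (coins : List Int) (n : Int) : Int :=
  let s := PySem.List.sorted coins (fun x => x) true
  let tot := s.sum
  let need := tot - PySem.Int.floordiv tot 2
  (s.length : Int) - altLoop need ((PySem.List.slice s (some 1) none).reverse) 0 0 0

-- ===== PRECONDITION & SPEC =====
def Spec_coinsToPick (coins : List Int) (n : Int) (out : Int) : Prop := out = coinsToPick_alt coins n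
instance (coins : List Int) (n : Int) (out : Int) : Decidable (Spec_coinsToPick coins n out) := by unfold Spec_coinsToPick; infer_instance

-- ===== CLAIM (what is proved, stated in full; the proofs are below) =====
def Claim_equal_coinsToPick : Prop := ∀ (coins : List Int) (n : Int), Dom_coinsToPick coins n → Spec_coinsToPick coins n (coinsToPick coins n)

-- ===== LEMMAS AND PROOFS =====

-- index (1-based) of the FIRST prefix of l whose sum added to `mine` exceeds `half`
def firstHit (half mine : Int) : List Int → Option ℕ
  | [] => none
  | c :: r => if mine + c > half then some 1 else (firstHit half (mine + c) r).map (· + 1)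

-- index (1-based) of the LAST prefix of l whose sum added to `s` stays below `need`
def lastHit (need s : Int) : List Int → Option ℕ
  | [] => none
  | c :: r =>
    match lastHit need (s + c) r with
    | some j => some (j + 1)
    | none => if s + c < need then some 1 else none

theorem coinsToPickLoop_eq (tot : Int) (l : List Int) : ∀ (mine count : Int),
    coinsToPickLoop tot l mine count =
      count + (match firstHit (PySem.Int.floordiv tot 2) mine l with
               | some j => (j : Int)
               | none => (l.length : Int)) := by
  induction l with
  | nil => intro mine count; simp [coinsToPickLoop, firstHit]
  | cons c r ih =>
    intro mine count
    simp only [coinsToPickLoop, firstHit]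
    by_cases h : mine + c > PySem.Int.floordiv tot 2
    · rw [if_pos h, if_pos h]; simp
    · rw [if_neg h, if_neg h, ih (mine + c) (count + 1)]
      cases hf : firstHit (PySem.Int.floordiv tot 2) (mine + c) r with
      | none => simp only [Option.map_none, List.length_cons]; push_cast; ring
      | some j => simp only [Option.map_some]; push_cast; ring

theorem altLoop_eq (need : Int) (l : List Int) : ∀ (m dropped best : Int),
    altLoop need l m dropped best =
      match lastHit need dropped l with
      | some j => m + (j : Int)
      | none => best := by
  induction l with
  | nil => intro m dropped best; simp [altLoop, lastHit]
  | cons c r ih =>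
    intro m dropped best
    simp only [altLoop, lastHit]
    rw [ih (m + 1) (dropped + c) _]
    cases hf : lastHit need (dropped + c) r with
    | some j => simp only []; push_cast; ring
    | none =>
      by_cases h : dropped + c < need
      · rw [if_pos h, if_pos h]; simp
      · rw [if_neg h, if_neg h]

-- what firstHit/lastHit compute, as first/last predicates on prefix sums
theorem firstHit_some (half : Int) (l : List Int) : ∀ (mine : Int) (j : ℕ),
    firstHit half mine l = some j →
      1 ≤ j ∧ j ≤ l.length ∧ mine + (l.take j).sum > half ∧
      ∀ i, 1 ≤ i → i < j → ¬(mine + (l.take i).sum > half) := by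
  induction l with
  | nil => intro mine j h; simp [firstHit] at h
  | cons c r ih =>
    intro mine j h
    simp only [firstHit] at h
    by_cases hc : mine + c > half
    · rw [if_pos hc] at h
      cases h
      refine ⟨le_refl _, by simp, by simpa using hc, ?_⟩
      intro i h1 h2; omega
    · rw [if_neg hc] at h
      cases hf : firstHit half (mine + c) r with
      | none => rw [hf] at h; simp at h
      | some j' =>
        rw [hf] at h; simp at h
        obtain ⟨h1, h2, h3, h4⟩ := ih (mine + c) j' hf
        subst h
        refine ⟨by omega, by simp; omega, ?_, ?_⟩
        · simpa [List.take_cons, add_assoc] using h3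
        · intro i hi1 hi2
          cases i with
          | zero => omega
          | succ i' =>
            cases i' with
            | zero => simpa using hc
            | succ i'' =>
              have := h4 (i'' + 1) (by omega) (by omega)
              simpa [List.take_cons, add_assoc] using this

theorem firstHit_none (half : Int) (l : List Int) : ∀ (mine : Int),
    firstHit half mine l = none →
      ∀ i, 1 ≤ i → i ≤ l.length → ¬(mine + (l.take i).sum > half) := by
  induction l with
  | nil => intro mine _ i h1 h2; simp at h2; omega
  | cons c r ih =>
    intro mine h i h1 h2
    simp only [firstHit] at h
    by_cases hc : mine + c > half
    · rw [if_pos hc] at h; simp at h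
    · rw [if_neg hc] at h
      cases hf : firstHit half (mine + c) r with
      | some j => rw [hf] at h; simp at h
      | none =>
        cases i with
        | zero => omega
        | succ i' =>
          cases i' with
          | zero => simpa using hc
          | succ i'' =>
            have := ih (mine + c) hf (i'' + 1) (by omega) (by simp at h2 ⊢; omega)
            simpa [List.take_cons, add_assoc] using this

theorem lastHit_none_aux (need : Int) (l : List Int) : ∀ (s : Int),
    lastHit need s l = none →
      ∀ i, 1 ≤ i → i ≤ l.length → ¬(s + (l.take i).sum < need) := by
  induction l with
  | nil => intro s _ i h1 h2; simp at h2; omega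
  | cons c r ih =>
    intro s h i h1 h2
    simp only [lastHit] at h
    cases hf : lastHit need (s + c) r with
    | some j => rw [hf] at h; simp at h
    | none =>
      rw [hf] at h
      by_cases hc : s + c < need
      · rw [if_pos hc] at h; simp at h
      · cases i with
        | zero => omega
        | succ i' =>
          cases i' with
          | zero => simpa using hc
          | succ i'' =>
            have := ih (s + c) hf (i'' + 1) (by omega) (by simp at h2 ⊢; omega)
            simpa [List.take_cons, add_assoc] using this

theorem lastHit_some (need : Int) (l : List Int) : ∀ (s : Int) (j : ℕ),
    lastHit need s l = some j →
      1 ≤ j ∧ j ≤ l.length ∧ s + (l.take j).sum < need ∧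
      ∀ i, j < i → i ≤ l.length → ¬(s + (l.take i).sum < need) := by
  induction l with
  | nil => intro s j h; simp [lastHit] at h
  | cons c r ih =>
    intro s j h
    simp only [lastHit] at h
    cases hf : lastHit need (s + c) r with
    | some j' =>
      rw [hf] at h; cases h
      obtain ⟨h1, h2, h3, h4⟩ := ih (s + c) j' hf
      refine ⟨by omega, by simp; omega, by simpa [List.take_cons, add_assoc] using h3, ?_⟩
      intro i hi1 hi2
      cases i with
      | zero => omega
      | succ i' =>
        have := h4 i' (by omega) (by simp at hi2 ⊢; omega)
        simpa [List.take_cons, add_assoc] using this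
    | none =>
      rw [hf] at h
      by_cases hc : s + c < need
      · rw [if_pos hc] at h; cases h
        refine ⟨le_refl _, by simp, by simpa using hc, ?_⟩
        intro i hi1 hi2
        cases i with
        | zero => omega
        | succ i' =>
          cases i' with
          | zero => omega
          | succ i'' =>
            have := lastHit_none_aux need r (s + c) hf (i'' + 1) (by omega) (by simp at hi2 ⊢; omega)
            simpa [List.take_cons, add_assoc] using this
      · rw [if_neg hc] at h; simp at h

-- prefix sums of the reversed tail are the complements of the prefix sums of the list
theorem rev_tail_take_sum (d : List Int) (j : ℕ) (h1 : 1 ≤ j) (h2 : j ≤ d.length - 1) :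
    (((d.drop 1).reverse.take j)).sum = d.sum - (d.take (d.length - j)).sum := by
  cases d with
  | nil => simp at h2; omega
  | cons c t =>
    simp only [List.drop_one, List.tail_cons, List.length_cons]
    have hj : j ≤ t.length := by simp at h2; omega
    rw [List.take_reverse]
    · rw [List.sum_reverse]
      have hsplit : (t.take (t.length - j)).sum + (t.drop (t.length - j)).sum = t.sum := by
        rw [← List.sum_append, List.take_append_drop]
      have htake : (c :: t).take (t.length + 1 - j) = c :: t.take (t.length - j) := by
        have : t.length + 1 - j = (t.length - j) + 1 := by omega
        rw [this, List.take_succ_cons]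
      rw [htake]
      simp only [List.sum_cons]
      omega

-- the core identity: first prefix over half  =  length − last droppable suffix
theorem core (d : List Int) :
    (match firstHit (PySem.Int.floordiv d.sum 2) 0 d with
     | some j => (j : Int)
     | none => (d.length : Int)) =
    (d.length : Int) -
      (match lastHit (d.sum - PySem.Int.floordiv d.sum 2) 0 ((d.drop 1).reverse) with
       | some j => (j : Int)
       | none => 0) := by
  set half := PySem.Int.floordiv d.sum 2 with hhalf
  set need := d.sum - half with hneed
  have hlen : ((d.drop 1).reverse).length = d.length - 1 := by simp
  -- correspondence: the j-th drop-condition equals the (length−j)-th pick-condition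
  have corr : ∀ j, 1 ≤ j → j ≤ d.length - 1 →
      ((0 + (((d.drop 1).reverse.take j)).sum < need) ↔
       (0 + (d.take (d.length - j)).sum > half)) := by
    intro j hj1 hj2
    rw [rev_tail_take_sum d j hj1 hj2]
    constructor <;> intro h <;> [skip; skip] <;> omega
  cases hA : firstHit half 0 d with
  | some jA =>
    obtain ⟨a1, a2, a3, a4⟩ := firstHit_some half d 0 jA hA
    cases hB : lastHit need 0 ((d.drop 1).reverse) with
    | some jB =>
      obtain ⟨b1, b2, b3, b4⟩ := lastHit_some need _ 0 jB hB
      rw [hlen] at b2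
      -- jB's drop-condition gives pick-condition at d.length - jB, before which none holds: jA ≤ d.length - jB
      have hpick : 0 + (d.take (d.length - jB)).sum > half := (corr jB b1 b2).1 b3
      have hge : d.length - jB ≥ jA := by
        by_contra hlt
        exact a4 (d.length - jB) (by omega) (by omega) hpick
      -- jA's pick-condition gives drop-condition at d.length - jA, after which none holds: d.length - jA ≤ jB
      have hA_le : jA ≤ d.length - 1 := by omega
      have hdrop : 0 + (((d.drop 1).reverse.take (d.length - jA))).sum < need := by
        have := (corr (d.length - jA) (by omega) (by omega)).2
        apply this
        have : d.length - (d.length - jA) = jA := by omega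
        rw [this]; exact a3
      have hle : d.length - jA ≤ jB := by
        by_contra hgt
        exact b4 (d.length - jA) (by omega) (by omega) hdrop
      simp only []
      omega
    | none =>
      -- no droppable suffix: jA must be d.length
      have hnone := lastHit_none_aux need _ 0 hB
      rw [hlen] at hnone
      have : jA = d.length := by
        by_contra hne
        have hlt : jA ≤ d.length - 1 := by omega
        have hdrop : 0 + (((d.drop 1).reverse.take (d.length - jA))).sum < need := by
          apply (corr (d.length - jA) (by omega) (by omega)).2
          have : d.length - (d.length - jA) = jA := by omega
          rw [this]; exact a3
        exact hnone (d.length - jA) (by omega) (by omega) hdrop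
      simp only []
      omega
  | none =>
    have hnone := firstHit_none half d 0 hA
    cases hB : lastHit need 0 ((d.drop 1).reverse) with
    | some jB =>
      obtain ⟨b1, b2, b3, _⟩ := lastHit_some need _ 0 jB hB
      rw [hlen] at b2
      have hpick : 0 + (d.take (d.length - jB)).sum > half := (corr jB b1 b2).1 b3
      exact absurd hpick (hnone (d.length - jB) (by omega) (by omega))
    | none => simp

-- ===== VERDICT (by name: the statement is the Claim_ definition above) =====
theorem coinsToPick_spec : Claim_equal_coinsToPick := by
  intro coins n _
  simp only [Spec_coinsToPick, coinsToPick, coinsToPick_alt]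
  set d := PySem.List.sorted coins (fun x => x) true with hd
  have hsum : d.sum = coins.sum := (PySem.List.sorted_perm coins (fun x => x) true).sum_eq
  rw [PySem.List.slice_from_one, ← List.drop_one]
  rw [coinsToPickLoop_eq, altLoop_eq, hsum]
  have := core d
  rw [hsum] at this
  simpa using this
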